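-- pv_equiv track=rewrite | github.com/aaronjrod/DCP | D172.py | find_concat_helper
-- ===== SOURCE A (Python) =====
-- def find_concat_helper(s, words):
--     if not words:
--         return True
--
--     for i in words:
--         if s[:len(i)] == i:
--             words.remove(i)
--             return find_concat_helper(s[len(i):], words)
--     return False
-- ===== SOURCE B (Python) =====
-- def find_concat_helper(s, words):
--     while words:
--         for j in range(len(words)):
--             if s.startswith(words[j]):
--                 s = s[len(words[j]):]
--                 words.pop(j)
--                 break
--         else:
--             return False
--     return True
-- ===== Notes on version B (the rewrite author's own statement) =====
-- stated objective: idiomatic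
-- what changed: A's recursion (first prefix match, words.remove, recursive call on the suffix) becomes an iterative while-loop with an indexed for/else scan and words.pop(j); same greedy first-match semantics and the same in-place mutation of words.
import Mathlib
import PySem

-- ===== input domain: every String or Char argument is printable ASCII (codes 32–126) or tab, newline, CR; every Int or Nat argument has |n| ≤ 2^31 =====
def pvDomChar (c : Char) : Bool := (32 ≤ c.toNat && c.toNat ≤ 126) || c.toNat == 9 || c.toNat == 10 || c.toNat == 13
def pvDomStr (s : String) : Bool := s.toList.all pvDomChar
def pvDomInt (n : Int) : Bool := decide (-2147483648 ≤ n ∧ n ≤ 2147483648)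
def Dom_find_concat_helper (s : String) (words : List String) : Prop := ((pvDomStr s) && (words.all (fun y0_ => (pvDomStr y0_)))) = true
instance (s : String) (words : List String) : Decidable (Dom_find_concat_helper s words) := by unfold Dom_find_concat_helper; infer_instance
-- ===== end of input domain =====

-- B replaces A's recursion (first prefix match, remove, recurse) by an iterative while-loop with
-- an indexed scan and pop; return values are proved equal — both Pythons also mutate `words`
-- identically in place (the equivalence here is about the return value).

-- ===== PORT A =====
-- Python recursion, one call per consumed word; fuel words.length + 1 suffices since each
-- recursive call removes one element (the fuel-0 branch is never reached from the wrapper).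
def find_concat_helper_loop : Nat → String → List String → Bool
  | 0, _, words => words.isEmpty
  | fuel+1, s, words =>
      if words.isEmpty then true
      else
        match words.find? (fun i => PySem.Str.slice s none (some (PySem.Str.len i : Int)) == i) with
        | some i => find_concat_helper_loop fuel
            (PySem.Str.slice s (some (PySem.Str.len i : Int)) none)
            ((PySem.List.remove? words i).getD words)   -- words.remove(i); i ∈ words, so getD is a totality guard only
        | none => false

def find_concat_helper (s : String) (words : List String) : Bool :=
  find_concat_helper_loop (words.length + 1) s words

-- ===== PORT B =====
-- the inner `for j in range(len(words)) … break/else`: first index whose word is a prefix,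
-- returning that word together with the list after popping it (none = the `else: return False` path)
def altScan (s : String) : List String → Option (String × List String)
  | [] => none
  | w :: ws =>
      if PySem.Str.startswith s w then some (w, ws)
      else (altScan s ws).map (fun r => (r.1, w :: r.2))

-- the `while words:` loop; each pass pops one word, so fuel words.length + 1 suffices
def altLoop : Nat → String → List String → Bool
  | 0, _, ws => ws.isEmpty
  | fuel+1, s, ws =>
      if ws.isEmpty then true
      else
        match altScan s ws with
        | none => false
        | some (w, rest) => altLoop fuel (PySem.Str.slice s (some (PySem.Str.len w : Int)) none) rest

def find_concat_helper_alt (s : String) (words : List String) : Bool :=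
  altLoop (words.length + 1) s words

-- ===== PRECONDITION & SPEC =====
def Spec_find_concat_helper (s : String) (words : List String) (out : Bool) : Prop := out = find_concat_helper_alt s words
instance (s : String) (words : List String) (out : Bool) : Decidable (Spec_find_concat_helper s words out) := by unfold Spec_find_concat_helper; infer_instance

-- ===== CLAIM (what is proved, stated in full; the proofs are below) =====
def Claim_equal_find_concat_helper : Prop := ∀ (s : String) (words : List String), Dom_find_concat_helper s words → Spec_find_concat_helper s words (find_concat_helper s words)

-- ===== LEMMAS AND PROOFS =====

-- A's slice-and-compare test is exactly "i is a prefix of s", i.e. B's startswith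
theorem pred_eq (s i : String) :
    (PySem.Str.slice s none (some (PySem.Str.len i : Int)) == i) = PySem.Str.startswith s i := by
  rw [Bool.eq_iff_iff]
  simp only [beq_iff_eq, ← String.toList_inj, PySem.Str.toList_slice,
    PySem.Chars.slice_eq_listSlice, PySem.Str.len_eq, PySem.Str.startswith_eq,
    PySem.Chars.startswith_iff]
  rw [PySem.List.slice_to_natCast, List.prefix_iff_eq_take, eq_comm]

-- B's scan = A's find? + remove of the found word
theorem scan_eq (s : String) (ws : List String) :
    altScan s ws = (ws.find? (fun i => PySem.Str.startswith s i)).bind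
      (fun i => (PySem.List.remove? ws i).map (fun r => (i, r))) := by
  induction ws with
  | nil => rfl
  | cons w ws ih =>
    cases h : PySem.Str.startswith s w with
    | true =>
      have h' := h; rw [PySem.Str.startswith_eq] at h'
      simp [altScan, h', PySem.List.remove?_cons_self]
    | false =>
      simp only [altScan, List.find?_cons, ih, h, Bool.false_eq_true, if_false]
      cases hf : ws.find? (fun i => PySem.Str.startswith s i) with
      | none => simp
      | some i =>
        have hi : PySem.Str.startswith s i = true := List.find?_some hf
        have hne : w ≠ i := fun e => by rw [e, hi] at h; cases h
        have hmem : i ∈ ws := List.mem_of_find?_eq_some hf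
        simp [PySem.List.remove?_cons_of_ne _ hne]
        cases PySem.List.remove? ws i <;> rfl

theorem loop_eq (fuel : Nat) (s : String) (ws : List String) :
    find_concat_helper_loop fuel s ws = altLoop fuel s ws := by
  induction fuel generalizing s ws with
  | zero => rfl
  | succ f ih =>
    simp only [find_concat_helper_loop, altLoop]
    by_cases he : ws.isEmpty
    · rw [if_pos he, if_pos he]
    · rw [if_neg he, if_neg he]
      have hp : (fun i => PySem.Str.slice s none (some (PySem.Str.len i : Int)) == i)
              = (fun i => PySem.Str.startswith s i) := funext (fun i => pred_eq s i)
      rw [hp, scan_eq]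
      cases hf : ws.find? (fun i => PySem.Str.startswith s i) with
      | none => rfl
      | some i =>
        have hmem : i ∈ ws := List.mem_of_find?_eq_some hf
        simp only [Option.bind_some, PySem.List.remove?_eq_some_erase ws i hmem,
          Option.map_some, Option.getD_some]
        exact ih _ _

-- ===== VERDICT (by name: the statement is the Claim_ definition above) =====
theorem find_concat_helper_spec : Claim_equal_find_concat_helper := by
  intro s words _
  unfold Spec_find_concat_helper find_concat_helper find_concat_helper_alt
  exact loop_eq _ s words
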